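-- pv_equiv track=rewrite | github.com/adv1996/sleeper-backend | sleeperMatchupFormatter.py | getStarters
-- ===== SOURCE A (Python) =====
-- def getStarters(roster_positions):
--   filteredPositions = list(filter(lambda pos: ("BN" != pos), roster_positions))
--   positions = []
--   count = 0
--   for pos in range (0, len(filteredPositions)):
--     if filteredPositions[pos] in filteredPositions[pos + 1::]:
--       count += 1
--     else:
--       count = 0
--     positions.append(filteredPositions[pos] + "-" + str(count))
--   return positions
-- ===== SOURCE B (Python) =====
-- def getStarters(roster_positions):
--     filtered = [p for p in roster_positions if p != "BN"]
--     # reverse pass: for each index, does the value occur again later?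
--     seen = set()
--     later = [False] * len(filtered)
--     for i in range(len(filtered) - 1, -1, -1):
--         later[i] = filtered[i] in seen
--         seen.add(filtered[i])
--     # forward sweep: running counter, incremented on a later-duplicate, reset otherwise
--     out = []
--     count = 0
--     for pos, dup in zip(filtered, later):
--         count = count + 1 if dup else 0
--         out.append(pos + "-" + str(count))
--     return out
-- ===== Notes on version B (the rewrite author's own statement) =====
-- stated objective: faster
-- what changed: Replaces A's per-element scan of the remaining slice (filteredPositions[pos+1:]) with a reverse pass that precomputes 'has a later duplicate' flags via a seen-set, followed by one forward sweep with a running counter.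
import Mathlib
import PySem

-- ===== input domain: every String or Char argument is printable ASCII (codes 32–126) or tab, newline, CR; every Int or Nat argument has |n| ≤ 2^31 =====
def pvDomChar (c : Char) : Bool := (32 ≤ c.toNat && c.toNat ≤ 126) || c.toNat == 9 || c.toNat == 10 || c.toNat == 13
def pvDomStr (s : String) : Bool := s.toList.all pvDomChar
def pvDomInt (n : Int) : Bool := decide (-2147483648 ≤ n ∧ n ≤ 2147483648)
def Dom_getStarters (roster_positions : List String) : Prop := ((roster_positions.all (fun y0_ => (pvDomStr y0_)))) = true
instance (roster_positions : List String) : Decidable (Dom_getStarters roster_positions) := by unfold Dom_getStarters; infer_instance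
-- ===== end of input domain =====

-- B replaces A's O(n^2) per-element suffix scans by a reverse seen-set pass plus one forward sweep (O(n)).

-- ===== PORT A =====
def getStarters (roster_positions : List String) : List String :=
  let filteredPositions := roster_positions.filter (fun pos => decide ("BN" ≠ pos))
  let res := (PySem.List.pyRange 0 filteredPositions.length 1).foldl
    (fun (st : List String × Int) pos =>
      let x := PySem.List.pyGetD filteredPositions pos ""
      let count : Int :=
        if (PySem.List.slice filteredPositions (some (pos + 1)) none).contains x then st.2 + 1 else 0
      (st.1 ++ [x ++ "-" ++ PySem.Int.toStr count], count))
    ([], 0)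
  res.1

-- ===== PORT B =====
-- reverse pass of Source B: flags over the REVERSED filtered list, threading the seen-set
def pvFlagsRev : List String → PySem.Set String → List Bool
  | [], _ => []
  | x :: xs, seen => PySem.Set.contains seen x :: pvFlagsRev xs (PySem.Set.add seen x)

-- forward sweep of Source B: running counter over (position, has-later-duplicate) pairs
def pvSweep : List (String × Bool) → Int → List String
  | [], _ => []
  | (p, d) :: rest, c =>
    let c' : Int := if d then c + 1 else 0
    (p ++ "-" ++ PySem.Int.toStr c') :: pvSweep rest c'

def getStarters_alt (roster_positions : List String) : List String :=
  let filtered := roster_positions.filter (fun p => decide (p ≠ "BN"))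
  let later := (pvFlagsRev filtered.reverse PySem.Set.empty).reverse
  pvSweep (filtered.zip later) 0

-- ===== PRECONDITION & SPEC =====
def Spec_getStarters (roster_positions : List String) (out : List String) : Prop := out = getStarters_alt roster_positions
instance (roster_positions : List String) (out : List String) : Decidable (Spec_getStarters roster_positions out) := by unfold Spec_getStarters; infer_instance

-- ===== CLAIM (what is proved, stated in full; the proofs are below) =====
def Claim_equal_getStarters : Prop := ∀ (roster_positions : List String), Dom_getStarters roster_positions → Spec_getStarters roster_positions (getStarters roster_positions)

-- ===== LEMMAS AND PROOFS =====

-- common reference recursion: counter resets unless the head recurs in the tail (or in s)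
def pvSpecS (s : PySem.Set String) : List String → Int → List String
  | [], _ => []
  | x :: xs, c =>
    let c' : Int := if (xs.contains x || PySem.Set.contains s x) then c + 1 else 0
    (x ++ "-" ++ PySem.Int.toStr c') :: pvSpecS s xs c'

theorem pvFoldlAdd_contains (l : List String) (s : PySem.Set String) (x : String) :
    PySem.Set.contains (l.foldl PySem.Set.add s) x = (l.contains x || PySem.Set.contains s x) := by
  induction l generalizing s with
  | nil => simp
  | cons y ys ih =>
    simp only [List.foldl_cons, ih, List.contains_cons]
    by_cases h : y = x
    · subst h
      simp [PySem.Set.add, PySem.Set.contains]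
      split_ifs with h' <;> simp [h']
    · have : (x == y) = false := by simp; exact fun e => h e.symm
      simp [this, PySem.Set.add, PySem.Set.contains]
      split_ifs with h' <;> simp [Ne.symm h]

theorem pvFlagsRev_append (l : List String) (x : String) (s : PySem.Set String) :
    pvFlagsRev (l ++ [x]) s = pvFlagsRev l s ++ [PySem.Set.contains (l.foldl PySem.Set.add s) x] := by
  induction l generalizing s with
  | nil => simp [pvFlagsRev]
  | cons y ys ih => simp [pvFlagsRev, ih]

theorem pvSweep_eq_specS (f : List String) (s : PySem.Set String) (c : Int) :
    pvSweep (f.zip ((pvFlagsRev f.reverse s).reverse)) c = pvSpecS s f c := by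
  induction f generalizing c with
  | nil => simp [pvSweep, pvSpecS]
  | cons x xs ih =>
    have h1 : (x :: xs).reverse = xs.reverse ++ [x] := by simp
    rw [h1, pvFlagsRev_append, List.reverse_append]
    simp only [List.reverse_cons, List.reverse_nil, List.nil_append, List.cons_append,
      List.zip_cons_cons, pvSweep, pvSpecS]
    rw [pvFoldlAdd_contains]
    simp [ih]

-- A's loop from index i computes pvSpecS over the suffix
theorem pvA_loop (f : List String) (i : Nat) (hi : i ≤ f.length) (acc : List String) (c : Int) :
    ((PySem.List.pyRange (i : Int) f.length 1).foldl
      (fun (st : List String × Int) pos =>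
        let x := PySem.List.pyGetD f pos ""
        let count : Int :=
          if (PySem.List.slice f (some (pos + 1)) none).contains x then st.2 + 1 else 0
        (st.1 ++ [x ++ "-" ++ PySem.Int.toStr count], count))
      (acc, c)).1 = acc ++ pvSpecS PySem.Set.empty (f.drop i) c := by
  induction h : f.length - i generalizing i acc c with
  | zero =>
    have he : i = f.length := by omega
    subst he
    rw [PySem.List.pyRange_one_eq_nil (by simp)]
    simp [pvSpecS]
  | succ n ih =>
    have hlt : i < f.length := by omega
    rw [PySem.List.pyRange_one_cons (by exact_mod_cast hlt)]
    have hcast : ((i : Int) + 1) = ((i + 1 : Nat) : Int) := by push_cast; ring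
    have hget : PySem.List.pyGetD f (i : Int) "" = f[i] := by
      rw [PySem.List.pyGetD_eq_getElem] <;> simp [hlt]
    have hslice : PySem.List.slice f (some ((i : Int) + 1)) none = f.drop (i + 1) := by
      rw [hcast, PySem.List.slice_from_natCast]
    simp only [List.foldl_cons]
    rw [hcast]
    rw [ih (i + 1) (by omega) _ _ (by omega)]
    have hdrop : f.drop i = f[i] :: f.drop (i + 1) := List.drop_eq_getElem_cons hlt
    rw [hdrop]
    simp [pvSpecS, hget, hslice]

theorem pvFilter_eq (rp : List String) :
    rp.filter (fun pos => decide ("BN" ≠ pos)) = rp.filter (fun p => decide (p ≠ "BN")) := by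
  apply List.filter_congr
  intro x _
  simp [ne_comm]

-- ===== VERDICT (by name: the statement is the Claim_ definition above) =====
theorem getStarters_spec : Claim_equal_getStarters := by
  intro rp _
  have hA := pvA_loop (rp.filter (fun p => decide (p ≠ "BN"))) 0 (by omega) [] 0
  simp only [Nat.cast_zero, List.drop_zero, List.nil_append] at hA
  unfold Spec_getStarters getStarters getStarters_alt
  simp only [pvFilter_eq]
  rw [hA, pvSweep_eq_specS]
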